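-- pv_equiv track=rewrite | github.com/ZedOud/Dash-dashboard | Dashboard/logic_parser_min.py | process_statement
-- ===== SOURCE A (Python) =====
-- def process_statement(original_input):
--     NOT, AND, OR, IMPLIES = ['~', '!'], ['&', '&&', '^', '/\\'], ['|', '||', '\\/'], ['->', '=>']
--     ACTIONS_LIST = NOT + AND + OR + IMPLIES
--     DEFAULT = (False, '|', False)
--     # original_input = '~ x & ( ~ y | ~ z ) -> z'
--     variables = sorted(list(set([a for a in original_input.split() if a.isalpha()])))
--     vals_table = []
--     output_lines = []
--
--     def action(v1, op, v2):
--         return (v1 & v2) if op in AND else (v1 | v2) if op in OR else (not v1) | v2 if op in IMPLIES else 'ERROR: '+op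
--
--     for i in range(2**len(variables))[::-1]:
--         n, a, v, q = *DEFAULT, []
--         for symb in original_input.split():
--             if   symb == '(': n, a, v, q = *DEFAULT, q+[[n, a, v]]
--             elif symb == ')': v, a, n = action(*(lambda n, a, v, tv: (v, a, (tv+n) % 2))(*q[-1], v)), q.pop()[1], False
--             elif symb in NOT: n = not n
--             elif symb in ACTIONS_LIST: a = symb
--             elif symb in variables: v, n = action(v, a, (i//2**(variables[::-1].index(symb)) % 2 + n) % 2), False
--             else: output_lines.append(f'BAD VALUE @ {i} = "{symb}"')
--         vals_table.append([i//2**x % 2 for x in range(len(variables))[::-1]]+[v])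
--
--     ft = variables + [original_input]
--     output_lines.append('\n'.join(['Input: '+original_input, '', ' | '.join(ft), '-+-'.join(['-'*len(a) for a in ft])]))
--     output_lines.append('\n'.join(' | '.join([('{:^%d}'%(len(tx))).format(v) for tx, v in zip(ft, val)]) for val in vals_table))
--     return '\n'.join(output_lines)
-- ===== SOURCE B (Python) =====
-- def process_statement(original_input):
--     NOT = ('~', '!'); AND = ('&', '&&', '^', '/\\'); OR = ('|', '||', '\\/'); IMP = ('->', '=>')
--     OPS = NOT + AND + OR + IMP
--     tokens = original_input.split()
--     variables = sorted({t for t in tokens if t.isalpha()})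
--     nv = len(variables)
--     R = 1 << nv                      # number of truth-table rows
--     ones = (1 << R) - 1              # mask with one bit per row, all set
--     # truth-table bitmask of each variable: bit i of the mask = its value in row i
--     masks = {}
--     for p, name in enumerate(reversed(variables)):
--         m = 0
--         for i in range(R):
--             m |= ((i >> p) & 1) << i
--         masks[name] = m
--     bad = [t for t in tokens
--            if t not in OPS and t not in ('(', ')') and not t.isalpha()]
--
--     def combine(v, op, x):
--         return v & x if op in AND else v | x if op in OR else (ones ^ v) | x
--
--     # single pass of the token machine, vectorized over all rows at once
--     neg, op, val, stack = 0, '|', 0, []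
--     for t in tokens:
--         if t == '(':
--             stack.append((neg, op, val))
--             neg, op, val = 0, '|', 0
--         elif t == ')':
--             n0, o0, v0 = stack[-1]
--             stack.pop()
--             val, op, neg = combine(v0, o0, val ^ (ones if n0 else 0)), o0, 0
--         elif t in NOT:
--             neg ^= 1
--         elif t in OPS:
--             op = t
--         elif t.isalpha():
--             val, neg = combine(val, op, masks[t] ^ (ones if neg else 0)), 0
--
--     out = []
--     for i in reversed(range(R)):
--         out.extend(f'BAD VALUE @ {i} = "{t}"' for t in bad)
--     ft = variables + [original_input]
--     out.append('\n'.join(['Input: ' + original_input, '',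
--                           ' | '.join(ft),
--                           '-+-'.join('-' * len(t) for t in ft)]))
--     rows = []
--     for i in reversed(range(R)):
--         cells = [(i >> (nv - 1 - k)) & 1 for k in range(nv)] + [(val >> i) & 1]
--         rows.append(' | '.join(str(c).center(len(t)) for t, c in zip(ft, cells)))
--     out.append('\n'.join(rows))
--     return '\n'.join(out)
-- ===== Notes on version B (the rewrite author's own statement) =====
-- stated objective: alternative
-- what changed: A re-runs the whole token machine once per truth-table row (2^n passes over the token list); B tokenizes once and runs the same machine a single time over truth-table bitmask integers (bit i of a mask = the value in row i), then reads each row's result off one bit, collecting bad tokens once instead of re-scanning per row.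
import Mathlib
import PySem

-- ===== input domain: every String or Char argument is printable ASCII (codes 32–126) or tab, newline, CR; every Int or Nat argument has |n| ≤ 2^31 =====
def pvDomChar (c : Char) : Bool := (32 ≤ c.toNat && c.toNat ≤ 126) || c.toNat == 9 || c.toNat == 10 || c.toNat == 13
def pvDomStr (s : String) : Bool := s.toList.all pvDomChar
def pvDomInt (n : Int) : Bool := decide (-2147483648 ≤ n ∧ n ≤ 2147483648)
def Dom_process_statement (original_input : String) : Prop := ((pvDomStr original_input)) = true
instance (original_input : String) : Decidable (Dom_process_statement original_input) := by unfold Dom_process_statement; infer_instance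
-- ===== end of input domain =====

-- B replaces A's 2^n re-runs of the token machine (one per truth-table row) by ONE run of the
-- same machine over truth-table bitmask integers (bit i = the value in row i); return value only.

-- ===== PORT A =====
-- the operator token lists NOT/AND/OR/IMPLIES and ACTIONS_LIST (shared data, both Pythons define the same tuples)
def pvNotL : List String := ["~", "!"]
def pvAndL : List String := ["&", "&&", "^", "/\\"]
def pvOrL : List String := ["|", "||", "\\/"]
def pvImpL : List String := ["->", "=>"]
def pvActionsL : List String := pvNotL ++ pvAndL ++ pvOrL ++ pvImpL

-- Python's bool values are carried as Int 0/1: A only combines them with &, |, not, +, % 2,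
-- and prints them through '{:^w}'.format, on which False/True render exactly as the digits 0/1.
-- def action(v1, op, v2)
def pvAction (v1 : Int) (op : String) (v2 : Int) : Int :=
  if pvAndL.contains op then (if v1 = 1 ∧ v2 = 1 then 1 else 0)
  else if pvOrL.contains op then (if v1 = 1 ∨ v2 = 1 then 1 else 0)
  else if pvImpL.contains op then (if v1 = 0 ∨ v2 = 1 then 1 else 0)
  else 0  -- Python returns the string 'ERROR: '+op here; unreachable: op is only ever drawn from AND/OR/IMPLIES

-- f'BAD VALUE @ {i} = "{symb}"'  (shared by both ports: both Pythons build this very f-string)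
def pvBadChars (i : Int) (symb : String) : List Char :=
  "BAD VALUE @ ".toList ++ PySem.Int.toChars i ++ " = \"".toList ++ symb.toList ++ "\"".toList

-- '{:^w}'.format(str) = str(v).center(w) for the one-char digits used here: pad with spaces,
-- extra space on the right (shared by both ports; exact for the single-character cell contents)
def pvCenter (cs : List Char) (w : Nat) : List Char :=
  let marg := w - cs.length
  List.replicate (marg / 2) ' ' ++ cs ++ List.replicate (marg - marg / 2) ' '

-- one token of A's inner loop; state (n, a, v, q, output_lines)
def pvStepA (vars : List String) (i : Int)
    (st : Int × String × Int × List (Int × String × Int) × List (List Char)) (symb : String) :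
    Int × String × Int × List (Int × String × Int) × List (List Char) :=
  let (n, a, v, q, out) := st
  if symb = "(" then (0, "|", 0, q ++ [(n, a, v)], out)
  else if symb = ")" then
    match q.getLast? with     -- q[-1] then q.pop(): the same last element
    | some (n0, a0, v0) => (0, a0, pvAction v0 a0 (PySem.Int.mod (v + n0) 2), q.dropLast, out)
    | none => (n, a, v, q, out)   -- Python raises IndexError (q[-1] on empty q): excluded by Pre_
  else if pvNotL.contains symb then ((if n = 0 then 1 else 0), a, v, q, out)
  else if pvActionsL.contains symb then (n, symb, v, q, out)
  else if vars.contains symb then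
    -- variables[::-1].index(symb): symb ∈ vars, so index? is some; 2**idx with idx : Nat
    let idx := (PySem.List.index? vars.reverse symb).getD 0
    (0, a, pvAction v a (PySem.Int.mod (PySem.Int.mod (PySem.Int.floordiv i ((2:Int) ^ idx)) 2 + n) 2), q, out)
  else (n, a, v, q, out ++ [pvBadChars i symb])

-- one iteration of A's outer loop over i: run the machine, then append the vals_table row
def pvRowA (vars toks : List String) (st : List (List Int) × List (List Char)) (i : Int) :
    List (List Int) × List (List Char) :=
  let r := toks.foldl (pvStepA vars i) (0, "|", 0, [], st.2)
  (st.1 ++ [((PySem.List.pyRange 0 (vars.length : Int) 1).reverse).map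
      (fun x => PySem.Int.mod (PySem.Int.floordiv i ((2:Int) ^ x.toNat)) 2) ++ [r.2.2.1]],
   r.2.2.2.2)

def process_statement (original_input : String) : String :=
  let toks := PySem.Str.split₀ original_input
  let vars := PySem.List.sorted (PySem.Set.ofList (toks.filter (fun a => PySem.Str.strIsalpha a))) (fun x => x) false
  -- for i in range(2**len(variables))[::-1]
  let st := ((PySem.List.pyRange 0 ((2:Int) ^ vars.length) 1).reverse).foldl (pvRowA vars toks) ([], [])
  let ft := vars ++ [original_input]
  let headerBlock := PySem.Chars.join ['\n']
      [ "Input: ".toList ++ original_input.toList, [],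
        PySem.Chars.join " | ".toList (ft.map String.toList),
        PySem.Chars.join "-+-".toList (ft.map (fun a => List.replicate a.toList.length '-')) ]
  let tableBlock := PySem.Chars.join ['\n']
      (st.1.map (fun val => PySem.Chars.join " | ".toList
        ((ft.zip val).map (fun tv => pvCenter (PySem.Int.toChars tv.2) tv.1.toList.length))))
  String.ofList (PySem.Chars.join ['\n'] (st.2 ++ [headerBlock, tableBlock]))

-- ===== PORT B =====
-- truth-table bitmask of the variable at position p of reversed(variables): bit i = (i >> p) & 1
def altVarMask (R p : Nat) : Nat :=
  (List.range R).foldl (fun m i => m ||| (((i >>> p) &&& 1) <<< i)) 0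

-- masks = {name: mask for p, name in enumerate(reversed(variables))}
def altMasks (vars : List String) (R : Nat) : PySem.Dict String Nat :=
  (PySem.List.enumerate vars.reverse).foldl
    (fun d pe => PySem.Dict.insert d pe.2 (altVarMask R pe.1.toNat)) (PySem.Dict.empty)

-- def combine(v, op, x) on row bitmasks
def altCombine (ones : Nat) (v : Nat) (op : String) (x : Nat) : Nat :=
  if pvAndL.contains op then v &&& x
  else if pvOrL.contains op then v ||| x
  else (ones ^^^ v) ||| x

-- one token of B's single machine pass; state (neg, op, val, stack)
def altStep (masksD : PySem.Dict String Nat) (ones : Nat)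
    (st : Nat × String × Nat × List (Nat × String × Nat)) (t : String) :
    Nat × String × Nat × List (Nat × String × Nat) :=
  let (neg, op, val, stack) := st
  if t = "(" then (0, "|", 0, stack ++ [(neg, op, val)])
  else if t = ")" then
    match stack.getLast? with   -- stack[-1] then stack.pop()
    | some (n0, o0, v0) =>
        (0, o0, altCombine ones v0 o0 (val ^^^ (if n0 ≠ 0 then ones else 0)), stack.dropLast)
    | none => (neg, op, val, stack)  -- Python raises IndexError here: excluded by Pre_
  else if pvNotL.contains t then (neg ^^^ 1, op, val, stack)
  else if pvActionsL.contains t then (neg, t, val, stack)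
  else if PySem.Str.strIsalpha t then
    -- masks[t]: every alpha token is a key of masks, so the lookup cannot fail
    (0, op, altCombine ones val op ((PySem.Dict.getD masksD t 0) ^^^ (if neg ≠ 0 then ones else 0)), stack)
  else (neg, op, val, stack)

def process_statement_alt (original_input : String) : String :=
  let tokens := PySem.Str.split₀ original_input
  let vbls := PySem.List.sorted (PySem.Set.ofList (tokens.filter (fun t => PySem.Str.strIsalpha t))) (fun x => x) false
  let nv := vbls.length
  let R := 1 <<< nv
  let ones := (1 <<< R) - 1
  let masksD := altMasks vbls R
  let bad := tokens.filter (fun t =>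
    !(pvActionsL.contains t) && !(t == "(") && !(t == ")") && !(PySem.Str.strIsalpha t))
  let fin := tokens.foldl (altStep masksD ones) (0, "|", 0, [])
  let val := fin.2.2.1
  let rev := (PySem.List.pyRange 0 ((R : Nat) : Int) 1).reverse    -- reversed(range(R))
  let out1 := rev.foldl (fun out i => out ++ bad.map (fun t => pvBadChars i t)) ([] : List (List Char))
  let ft := vbls ++ [original_input]
  let headerBlock := PySem.Chars.join ['\n']
      [ "Input: ".toList ++ original_input.toList, [],
        PySem.Chars.join " | ".toList (ft.map String.toList),
        PySem.Chars.join "-+-".toList (ft.map (fun t => List.replicate t.toList.length '-')) ]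
  let rowsBlock := PySem.Chars.join ['\n'] (rev.foldl (fun rows i =>
      rows ++ [PySem.Chars.join " | ".toList ((ft.zip (
          (List.range nv).map (fun k => ((i.toNat >>> (nv - 1 - k)) &&& 1 : Nat))
            ++ [(val >>> i.toNat) &&& 1])).map
        (fun tc => pvCenter (PySem.Int.toChars ((tc.2 : Nat) : Int)) tc.1.toList.length))]) [])
  String.ofList (PySem.Chars.join ['\n'] (out1 ++ [headerBlock, rowsBlock]))

-- ===== PRECONDITION & SPEC =====
-- Pre_ excludes exactly the inputs on which A raises IndexError: a ')' token with no '(' still open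
-- (some prefix of the whitespace-split token list contains more ')' than '(').
def Pre_process_statement (original_input : String) : Prop :=
  ∀ k, k ≤ (PySem.Str.split₀ original_input).length →
    ((PySem.Str.split₀ original_input).take k).count ")" ≤ ((PySem.Str.split₀ original_input).take k).count "("
instance (original_input : String) : Decidable (Pre_process_statement original_input) := by
  unfold Pre_process_statement; infer_instance
def pvWitness_process_statement : String := "~ x & ( ~ y | ~ z ) -> z"

def Spec_process_statement (original_input : String) (out : String) : Prop := out = process_statement_alt original_input
instance (original_input : String) (out : String) : Decidable (Spec_process_statement original_input out) := by unfold Spec_process_statement; infer_instance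

-- ===== CLAIM (what is proved, stated in full; the proofs are below) =====
def Claim_equal_process_statement : Prop := ∀ (original_input : String), Dom_process_statement original_input → Pre_process_statement original_input → Spec_process_statement original_input (process_statement original_input)

-- ===== LEMMAS AND PROOFS =====

def pvB2i (b : Bool) : Int := if b then 1 else 0

theorem pv_testBit_div_mod (x i : ℕ) : x.testBit i = decide (x / 2 ^ i % 2 = 1) := by
  rw [Nat.testBit, Nat.shiftRight_eq_div_pow, Nat.one_and_eq_mod_two]
  rcases Nat.mod_two_eq_zero_or_one (x / 2 ^ i) with h | h <;> simp [h]

-- the tokens A's inner loop treats as bad (falls through to the final else)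
def pvBadP (vars : List String) (t : String) : Bool :=
  !(t == "(") && !(t == ")") && !(pvNotL.contains t) && !(pvActionsL.contains t) && !(vars.contains t)

-- pvStepA without the output_lines component
def pvCoreA (vars : List String) (i : Int)
    (st : Int × String × Int × List (Int × String × Int)) (symb : String) :
    Int × String × Int × List (Int × String × Int) :=
  let (n, a, v, q) := st
  if symb = "(" then (0, "|", 0, q ++ [(n, a, v)])
  else if symb = ")" then
    match q.getLast? with
    | some (n0, a0, v0) => (0, a0, pvAction v0 a0 (PySem.Int.mod (v + n0) 2), q.dropLast)
    | none => (n, a, v, q)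
  else if pvNotL.contains symb then ((if n = 0 then 1 else 0), a, v, q)
  else if pvActionsL.contains symb then (n, symb, v, q)
  else if vars.contains symb then
    let idx := (PySem.List.index? vars.reverse symb).getD 0
    (0, a, pvAction v a (PySem.Int.mod (PySem.Int.mod (PySem.Int.floordiv i ((2:Int) ^ idx)) 2 + n) 2), q)
  else (n, a, v, q)

theorem pv_stepA_core (vars : List String) (i : Int) (n : Int) (a : String) (v : Int)
    (q : List (Int × String × Int)) (out : List (List Char)) (symb : String) :
    pvStepA vars i (n, a, v, q, out) symb =
      ((pvCoreA vars i (n, a, v, q) symb).1,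
       (pvCoreA vars i (n, a, v, q) symb).2.1,
       (pvCoreA vars i (n, a, v, q) symb).2.2.1,
       (pvCoreA vars i (n, a, v, q) symb).2.2.2,
       out ++ if pvBadP vars symb then [pvBadChars i symb] else []) := by
  unfold pvStepA pvCoreA pvBadP
  split_ifs with h1 h2 h3 h4 h5 <;> simp_all
  · cases hq : q.getLast? with
    | none => simp
    | some x => rcases x with ⟨n0, a0, v0⟩; simp

theorem pv_foldA_split (vars : List String) (i : Int) (ts : List String) :
    ∀ (n : Int) (a : String) (v : Int) (q : List (Int × String × Int)) (out : List (List Char)),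
      ts.foldl (pvStepA vars i) (n, a, v, q, out) =
        ((ts.foldl (pvCoreA vars i) (n, a, v, q)).1,
         (ts.foldl (pvCoreA vars i) (n, a, v, q)).2.1,
         (ts.foldl (pvCoreA vars i) (n, a, v, q)).2.2.1,
         (ts.foldl (pvCoreA vars i) (n, a, v, q)).2.2.2,
         out ++ (ts.filter (pvBadP vars)).map (pvBadChars i)) := by
  induction ts with
  | nil => intro n a v q out; simp
  | cons t ts ih =>
    intro n a v q out
    rw [List.foldl_cons, List.foldl_cons, pv_stepA_core]
    rw [ih, List.filter_cons]
    by_cases hb : pvBadP vars t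
    · simp [hb, List.append_assoc]
    · simp [hb]

-- ---------- the per-row/bitmask machine relation ----------

abbrev pvRelOp (a : String) : Prop := a ∈ pvAndL ∨ a ∈ pvOrL ∨ a ∈ pvImpL

abbrev pvRelE (i : Nat) (x : Int × String × Int) (y : Nat × String × Nat) : Prop :=
  x.1 = (y.1 : Int) ∧ y.1 ≤ 1 ∧ x.2.1 = y.2.1 ∧ pvRelOp x.2.1 ∧ x.2.2 = pvB2i (y.2.2.testBit i)

abbrev pvRel (i : Nat) (s1 : Int × String × Int × List (Int × String × Int))
    (s2 : Nat × String × Nat × List (Nat × String × Nat)) : Prop :=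
  s1.1 = (s2.1 : Int) ∧ s2.1 ≤ 1 ∧ s1.2.1 = s2.2.1 ∧ pvRelOp s1.2.1 ∧
  s1.2.2.1 = pvB2i (s2.2.2.1.testBit i) ∧ List.Forall₂ (pvRelE i) s1.2.2.2 s2.2.2.2

theorem pv_forall₂_getLast {α β : Type} {r : α → β → Prop} :
    ∀ {xs : List α} {ys : List β}, List.Forall₂ r xs ys →
      (xs.getLast? = none ∧ ys.getLast? = none) ∨
      (∃ x y, xs.getLast? = some x ∧ ys.getLast? = some y ∧ r x y ∧
        List.Forall₂ r xs.dropLast ys.dropLast) := by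
  intro xs ys h
  induction h with
  | nil => left; simp
  | @cons x y l1 l2 hxy hrest ih =>
    right
    cases hrest with
    | nil => exact ⟨x, y, by simp, by simp, hxy, by simp⟩
    | @cons x' y' l1' l2' hxy' hrest' =>
      rcases ih with ⟨h1, h2⟩ | ⟨a, b, ha, hb, hab, hd⟩
      · simp at h1
      · exact ⟨a, b, by simpa using ha, by simpa using hb, hab,
          by simpa using List.Forall₂.cons hxy hd⟩

theorem pv_mod2 (b c : Bool) : PySem.Int.mod (pvB2i b + pvB2i c) 2 = pvB2i (b ^^ c) := by
  cases b <;> cases c <;> decide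

theorem pv_combine_rel (R i : Nat) (hi : i < R) (a : String) (hop : pvRelOp a)
    (w1 : Nat) (x2 : Nat) :
    pvAction (pvB2i (w1.testBit i)) a (pvB2i (x2.testBit i)) =
      pvB2i ((altCombine (2 ^ R - 1) w1 a x2).testBit i) := by
  rcases hop with h | h | h <;> fin_cases h <;>
    norm_num [pvAction, altCombine, pvNotL, pvAndL, pvOrL, pvImpL] <;>
    (try simp only [Nat.testBit_land, Nat.testBit_lor, Nat.testBit_xor,
      Nat.testBit_two_pow_sub_one, hi, decide_true, Bool.true_xor]) <;>
    (cases hw : w1.testBit i <;> cases hx : x2.testBit i <;> simp [pvB2i, hw, hx, hi])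

theorem pv_forall₂_append {α β : Type} {r : α → β → Prop} :
    ∀ {l1 : List α} {l2 : List β} {l3 : List α} {l4 : List β},
      List.Forall₂ r l1 l2 → List.Forall₂ r l3 l4 → List.Forall₂ r (l1 ++ l3) (l2 ++ l4) := by
  intro l1 l2 l3 l4 h1 h2
  induction h1 with
  | nil => simpa
  | cons hxy _ ih => exact List.Forall₂.cons hxy ih

theorem pv_step_rel (vars : List String) (masksD : PySem.Dict String Nat) (R i : Nat)
    (hi : i < R) (t : String) (hvar : vars.contains t = PySem.Str.strIsalpha t)
    (hmask : ∀ u, vars.contains u = true →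
      (PySem.Dict.getD masksD u 0).testBit i =
        i.testBit ((PySem.List.index? vars.reverse u).getD 0))
    (s1 : Int × String × Int × List (Int × String × Int))
    (s2 : Nat × String × Nat × List (Nat × String × Nat)) (h : pvRel i s1 s2) :
    pvRel i (pvCoreA vars (i : Int) s1 t) (altStep masksD (2 ^ R - 1) s2 t) := by
  obtain ⟨n, a, v, q⟩ := s1
  obtain ⟨g, o, w, st⟩ := s2
  obtain ⟨hn, hg1, ha, hop, hv, hq⟩ := h
  dsimp only at hn hg1 ha hop hv hq
  subst ha
  dsimp only [pvCoreA, altStep]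
  rw [hvar]
  split_ifs with h1 h2 h3 hn0 h4 h5 hgz
  · -- '('
    refine ⟨rfl, by norm_num, rfl, ?_, ?_, ?_⟩
    · show pvRelOp "|"; decide
    · show (0 : Int) = pvB2i (Nat.testBit 0 i); simp [pvB2i, Nat.zero_testBit]
    · exact pv_forall₂_append hq
        (List.forall₂_cons.mpr ⟨⟨hn, hg1, rfl, hop, hv⟩, List.Forall₂.nil⟩)
  · -- ')'
    rcases pv_forall₂_getLast hq with ⟨hq1, hq2⟩ | ⟨x, y, hx, hy, hxy, hdrop⟩
    · rw [hq1, hq2]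
      exact ⟨hn, hg1, rfl, hop, hv, hq⟩
    · rw [hx, hy]
      obtain ⟨n0, a0, v0⟩ := x
      obtain ⟨g0, o0, w0⟩ := y
      obtain ⟨hn0, hg0, ha0, hop0, hv0⟩ := hxy
      dsimp only at hn0 hg0 ha0 hop0 hv0
      subst ha0
      refine ⟨rfl, by norm_num, rfl, hop0, ?_, hdrop⟩
      have hx1 : PySem.Int.mod (v + n0) 2 = pvB2i (w.testBit i ^^ decide (g0 ≠ 0)) := by
        rw [hv, hn0]
        interval_cases g0
        · rw [show ((0:Nat):Int) = pvB2i false by rfl, pv_mod2]; simp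
        · rw [show ((1:Nat):Int) = pvB2i true by rfl, pv_mod2]; simp
      have hx2 : (w ^^^ (if g0 ≠ 0 then 2 ^ R - 1 else 0)).testBit i
          = (w.testBit i ^^ decide (g0 ≠ 0)) := by
        by_cases hgz : g0 ≠ 0
        · simp [hgz, Nat.testBit_xor, Nat.testBit_two_pow_sub_one, hi]
        · simp [hgz, Nat.testBit_xor]
      show pvAction v0 a0 (PySem.Int.mod (v + n0) 2)
        = pvB2i ((altCombine (2 ^ R - 1) w0 a0 (w ^^^ (if g0 ≠ 0 then 2 ^ R - 1 else 0))).testBit i)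
      rw [hx1, hv0, ← hx2]
      exact pv_combine_rel R i hi a0 hop0 w0 _
  · -- NOT token, n = 0
    refine ⟨?_, ?_, rfl, hop, hv, hq⟩
    · show (1 : Int) = ((g ^^^ 1 : Nat) : Int)
      rw [hn0] at hn
      interval_cases g
      · decide
      · simp at hn
    · show g ^^^ 1 ≤ 1
      interval_cases g <;> decide
  · -- NOT token, n ≠ 0
    refine ⟨?_, ?_, rfl, hop, hv, hq⟩
    · show (0 : Int) = ((g ^^^ 1 : Nat) : Int)
      interval_cases g
      · rw [hn] at hn0; simp at hn0
      · decide
    · show g ^^^ 1 ≤ 1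
      interval_cases g <;> decide
  · -- other operator token
    refine ⟨hn, hg1, rfl, ?_, hv, hq⟩
    show pvRelOp t
    have hmem := List.contains_iff_mem.mp h4
    unfold pvActionsL at hmem
    rcases List.mem_append.mp hmem with h12 | hh
    · rcases List.mem_append.mp h12 with h1' | hh
      · rcases List.mem_append.mp h1' with hh | hh
        · exact absurd (List.contains_iff_mem.mpr hh) (by simpa using h3)
        · exact Or.inl hh
      · exact Or.inr (Or.inl hh)
    · exact Or.inr (Or.inr hh)
  · -- variable token, neg ≠ 0
    have h5' : vars.contains t = true := by rw [hvar]; exact h5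
    refine ⟨rfl, by norm_num, rfl, hop, ?_, hq⟩
    have hbit : PySem.Int.mod (PySem.Int.floordiv (i : Int)
        ((2:Int) ^ (PySem.List.index? vars.reverse t).getD 0)) 2
        = pvB2i (i.testBit ((PySem.List.index? vars.reverse t).getD 0)) := by
      set p := (PySem.List.index? vars.reverse t).getD 0
      have hc : ((2:Int) ^ p) = ((2 ^ p : Nat) : Int) := by push_cast; ring
      rw [hc, PySem.Int.floordiv_natCast, show (2:Int) = ((2:Nat):Int) by norm_num,
        PySem.Int.mod_natCast, pv_testBit_div_mod]
      rcases Nat.mod_two_eq_zero_or_one (i / 2 ^ p) with hb | hb <;> simp [hb, pvB2i]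
    have hg : g = 1 := by omega
    have hx1 : PySem.Int.mod (PySem.Int.mod (PySem.Int.floordiv (i : Int)
        ((2:Int) ^ (PySem.List.index? vars.reverse t).getD 0)) 2 + n) 2
        = pvB2i (!(i.testBit ((PySem.List.index? vars.reverse t).getD 0))) := by
      rw [hbit, hn, hg, show ((1:Nat):Int) = pvB2i true by rfl, pv_mod2]
      simp
    have hx2 : ((PySem.Dict.getD masksD t 0) ^^^ (2 ^ R - 1)).testBit i
        = (!(i.testBit ((PySem.List.index? vars.reverse t).getD 0))) := by
      simp [Nat.testBit_xor, Nat.testBit_two_pow_sub_one, hi, hmask t h5']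
    show pvAction v a (PySem.Int.mod (PySem.Int.mod (PySem.Int.floordiv (i : Int)
        ((2:Int) ^ (PySem.List.index? vars.reverse t).getD 0)) 2 + n) 2)
      = pvB2i ((altCombine (2 ^ R - 1) w a ((PySem.Dict.getD masksD t 0) ^^^ (2 ^ R - 1))).testBit i)
    rw [hx1, hv, ← hx2]
    exact pv_combine_rel R i hi a hop w _
  · -- variable token, neg = 0
    have h5' : vars.contains t = true := by rw [hvar]; exact h5
    refine ⟨rfl, by norm_num, rfl, hop, ?_, hq⟩
    have hbit : PySem.Int.mod (PySem.Int.floordiv (i : Int)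
        ((2:Int) ^ (PySem.List.index? vars.reverse t).getD 0)) 2
        = pvB2i (i.testBit ((PySem.List.index? vars.reverse t).getD 0)) := by
      set p := (PySem.List.index? vars.reverse t).getD 0
      have hc : ((2:Int) ^ p) = ((2 ^ p : Nat) : Int) := by push_cast; ring
      rw [hc, PySem.Int.floordiv_natCast, show (2:Int) = ((2:Nat):Int) by norm_num,
        PySem.Int.mod_natCast, pv_testBit_div_mod]
      rcases Nat.mod_two_eq_zero_or_one (i / 2 ^ p) with hb | hb <;> simp [hb, pvB2i]
    have hg : g = 0 := by omega
    have hx1 : PySem.Int.mod (PySem.Int.mod (PySem.Int.floordiv (i : Int)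
        ((2:Int) ^ (PySem.List.index? vars.reverse t).getD 0)) 2 + n) 2
        = pvB2i (i.testBit ((PySem.List.index? vars.reverse t).getD 0)) := by
      rw [hbit, hn, hg, show ((0:Nat):Int) = pvB2i false by rfl, pv_mod2]
      simp
    have hx2 : ((PySem.Dict.getD masksD t 0) ^^^ 0).testBit i
        = (i.testBit ((PySem.List.index? vars.reverse t).getD 0)) := by
      simp [hmask t h5']
    show pvAction v a (PySem.Int.mod (PySem.Int.mod (PySem.Int.floordiv (i : Int)
        ((2:Int) ^ (PySem.List.index? vars.reverse t).getD 0)) 2 + n) 2)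
      = pvB2i ((altCombine (2 ^ R - 1) w a ((PySem.Dict.getD masksD t 0) ^^^ 0)).testBit i)
    rw [hx1, hv, ← hx2]
    exact pv_combine_rel R i hi a hop w _
  · -- bad token
    exact ⟨hn, hg1, rfl, hop, hv, hq⟩

theorem pv_fold_rel (vars : List String) (masksD : PySem.Dict String Nat) (R i : Nat)
    (hi : i < R)
    (hmask : ∀ u, vars.contains u = true →
      (PySem.Dict.getD masksD u 0).testBit i =
        i.testBit ((PySem.List.index? vars.reverse u).getD 0)) :
    ∀ (ts : List String), (∀ t ∈ ts, vars.contains t = PySem.Str.strIsalpha t) →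
    ∀ s1 s2, pvRel i s1 s2 →
      pvRel i (ts.foldl (pvCoreA vars (i : Int)) s1) (ts.foldl (altStep masksD (2 ^ R - 1)) s2) := by
  intro ts
  induction ts with
  | nil => intro _ s1 s2 h; exact h
  | cons t ts ih =>
    intro hvar s1 s2 h
    exact ih (fun u hu => hvar u (List.mem_cons_of_mem _ hu))
      _ _ (pv_step_rel vars masksD R i hi t (hvar t (List.mem_cons_self ..)) hmask s1 s2 h)

-- ---------- variable masks ----------

theorem pv_and1_testBit (N p : Nat) : ((N >>> p) &&& 1).testBit 0 = N.testBit p := by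
  rw [pv_testBit_div_mod, pv_testBit_div_mod, Nat.and_one_is_mod, Nat.shiftRight_eq_div_pow]
  simp only [pow_zero, Nat.div_one]
  exact decide_eq_decide.mpr (by omega)

theorem pv_testBit_foldRange (p : Nat) :
    ∀ (N : Nat) (acc i : Nat),
      ((List.range N).foldl (fun m j => m ||| (((j >>> p) &&& 1) <<< j)) acc).testBit i =
        (acc.testBit i || (decide (i < N) && i.testBit p)) := by
  intro N
  induction N with
  | zero => intro acc i; simp
  | succ N ih =>
    intro acc i
    rw [List.range_succ, List.foldl_append, List.foldl_cons, List.foldl_nil,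
      Nat.testBit_lor, ih, Nat.testBit_shiftLeft]
    rcases Nat.lt_trichotomy i N with hlt | heq | hgt
    · simp [hlt, Nat.lt_succ_of_lt hlt, Nat.not_le_of_lt hlt]
    · subst heq
      simp [Nat.lt_irrefl, Nat.lt_succ_self, pv_and1_testBit]
    · have h1 : ¬ i < N := Nat.lt_asymm hgt
      have h2 : ¬ i < N + 1 := by omega
      have h3 : ((N >>> p) &&& 1).testBit (i - N) = false := by
        apply Nat.testBit_lt_two_pow
        have h5 : (N >>> p) &&& 1 ≤ 1 := Nat.and_le_right
        have h4 : 1 ≤ i - N := by omega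
        calc (N >>> p) &&& 1 ≤ 1 := h5
          _ < 2 ^ 1 := by norm_num
          _ ≤ 2 ^ (i - N) := Nat.pow_le_pow_right (by norm_num) h4
      simp only [h3, Bool.and_false, Bool.or_false]
      simp [h1, h2]

theorem pv_testBit_varMask (R p i : Nat) (hi : i < R) :
    (altVarMask R p).testBit i = i.testBit p := by
  unfold altVarMask
  rw [pv_testBit_foldRange]
  simp [hi, Nat.zero_testBit]

-- ---------- the masks dictionary ----------

theorem pv_index?_cons_self (x : String) (xs : List String) :
    PySem.List.index? (x :: xs) x = some 0 := by
  simp [PySem.List.index?, List.idxOf?_cons]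

theorem pv_index?_cons_ne (t x : String) (xs : List String) (h : t ≠ x) :
    PySem.List.index? (x :: xs) t = (PySem.List.index? xs t).map (· + 1) := by
  simp [PySem.List.index?, List.idxOf?_cons]
  exact Ne.symm h

theorem pv_getD_fold_not_mem (f : Nat → Nat) (l : List String) (t : String) (ht : t ∉ l) :
    ∀ (s : Int) (d : PySem.Dict String Nat),
      PySem.Dict.getD ((PySem.List.enumerate l s).foldl
        (fun d pe => PySem.Dict.insert d pe.2 (f pe.1.toNat)) d) t 0 = PySem.Dict.getD d t 0 := by
  induction l with
  | nil => intro s d; simp [PySem.List.enumerate]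
  | cons x xs ih =>
    intro s d
    rw [PySem.List.enumerate_cons, List.foldl_cons,
      ih (fun hm => ht (List.mem_cons_of_mem _ hm)),
      PySem.Dict.getD_insert]
    rw [if_neg (fun he => ht (by rw [he]; exact List.mem_cons_self ..))]

theorem pv_getD_foldEnum (f : Nat → Nat) :
    ∀ (l : List String), l.Nodup → ∀ (s : Nat) (d : PySem.Dict String Nat) (t : String), t ∈ l →
      PySem.Dict.getD ((PySem.List.enumerate l (s : Int)).foldl
        (fun d pe => PySem.Dict.insert d pe.2 (f pe.1.toNat)) d) t 0 =
        f (s + (PySem.List.index? l t).getD 0) := by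
  intro l
  induction l with
  | nil => intro _ s d t ht; simp at ht
  | cons x xs ih =>
    intro hnd s d t ht
    rw [PySem.List.enumerate_cons, List.foldl_cons]
    have hxx : ((s : Int) + 1) = ((s + 1 : Nat) : Int) := by push_cast; ring
    by_cases hte : t = x
    · subst hte
      have hnx : t ∉ xs := (List.nodup_cons.mp hnd).1
      rw [hxx, pv_getD_fold_not_mem f xs t hnx, PySem.Dict.getD_insert, if_pos rfl,
        pv_index?_cons_self]
      simp
    · have htxs : t ∈ xs := by
        rcases List.mem_cons.mp ht with h | h
        · exact absurd h hte
        · exact h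
      rw [hxx, ih (List.nodup_cons.mp hnd).2 (s + 1) _ t htxs, pv_index?_cons_ne t x xs hte]
      have : ∃ k, PySem.List.index? xs t = some k := by
        have := List.isSome_idxOf?.mpr htxs
        simpa [PySem.List.index?, Option.isSome_iff_exists] using this
      obtain ⟨k, hk⟩ := this
      rw [hk]
      simp only [Option.map_some, Option.getD_some]
      congr 1
      omega

-- ---------- assembly ----------

theorem pv_vars_contains (toks : List String) (t : String) (ht : t ∈ toks) :
    (PySem.List.sorted (PySem.Set.ofList (toks.filter (fun a => PySem.Str.strIsalpha a)))
        (fun x => x) false).contains t = PySem.Str.strIsalpha t := by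
  by_cases h : PySem.Str.strIsalpha t
  · rw [h]
    exact List.contains_iff_mem.mpr (by
      rw [PySem.List.mem_sorted, PySem.Set.mem_ofList]
      exact List.mem_filter.mpr ⟨ht, h⟩)
  · have h' : PySem.Str.strIsalpha t = false := Bool.eq_false_iff.mpr h
    rw [h']
    apply Bool.eq_false_iff.mpr
    intro hc
    have hmem := List.contains_iff_mem.mp hc
    rw [PySem.List.mem_sorted, PySem.Set.mem_ofList] at hmem
    exact h (List.mem_filter.mp hmem).2

theorem pv_vars_nodup (xs : List String) :
    (PySem.List.sorted (PySem.Set.ofList xs) (fun x => x) false).Nodup :=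
  (PySem.List.sorted_ofList_pairwise_lt xs).imp (fun h => ne_of_lt h)

theorem pv_hmask (vars : List String) (hnd : vars.Nodup) (R i : Nat) (hi : i < R) :
    ∀ u, vars.contains u = true →
      (PySem.Dict.getD (altMasks vars R) u 0).testBit i =
        i.testBit ((PySem.List.index? vars.reverse u).getD 0) := by
  intro u hu
  have hmem : u ∈ vars.reverse := List.mem_reverse.mpr (List.contains_iff_mem.mp hu)
  have h0 := pv_getD_foldEnum (altVarMask R) vars.reverse (List.nodup_reverse.mpr hnd) 0 PySem.Dict.empty u hmem
  have h1 : PySem.Dict.getD (altMasks vars R) u 0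
      = altVarMask R ((PySem.List.index? vars.reverse u).getD 0) := by
    unfold altMasks
    simpa using h0
  rw [h1, pv_testBit_varMask R _ i hi]

-- the vals_table row A appends for index i
def pvRowInts (vars toks : List String) (i : Int) : List Int :=
  ((PySem.List.pyRange 0 (vars.length : Int) 1).reverse).map
      (fun x => PySem.Int.mod (PySem.Int.floordiv i ((2:Int) ^ x.toNat)) 2)
    ++ [(toks.foldl (pvCoreA vars i) (0, "|", 0, [])).2.2.1]

theorem pv_rowA_eq (vars toks : List String) (st : List (List Int) × List (List Char)) (i : Int) :
    pvRowA vars toks st i =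
      (st.1 ++ [pvRowInts vars toks i],
       st.2 ++ (toks.filter (pvBadP vars)).map (pvBadChars i)) := by
  unfold pvRowA pvRowInts
  rw [pv_foldA_split]

theorem pv_pair_fold {α : Type} (f : α → List Int) (g : α → List (List Char)) :
    ∀ (rng : List α) (tb : List (List Int)) (o : List (List Char)),
      rng.foldl (fun st i => (st.1 ++ [f i], st.2 ++ g i)) (tb, o)
        = (tb ++ rng.map f, o ++ rng.flatMap g) := by
  intro rng
  induction rng with
  | nil => intro tb o; simp
  | cons i rng ih =>
    intro tb o
    rw [List.foldl_cons]
    dsimp only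
    rw [ih]
    simp

theorem pv_nat_and1 (m p : Nat) : ((m >>> p) &&& 1) = m / 2 ^ p % 2 := by
  rw [Nat.and_one_is_mod, Nat.shiftRight_eq_div_pow]

theorem pv_cells_eq (nv iN : Nat) (valA : Int) (valB : Nat)
    (hval : valA = pvB2i (valB.testBit iN)) :
    ((PySem.List.pyRange 0 (nv : Int) 1).reverse).map
        (fun x => PySem.Int.mod (PySem.Int.floordiv ((iN : Nat) : Int) ((2:Int) ^ x.toNat)) 2)
      ++ [valA]
    = (((List.range nv).map (fun k => ((iN >>> (nv - 1 - k)) &&& 1 : Nat)))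
      ++ [(valB >>> iN) &&& 1]).map (fun c => ((c : Nat) : Int)) := by
  rw [List.map_append]
  congr 1
  · apply List.ext_getElem
    · simp [PySem.List.length_pyRange_one]
    · intro k hk1 hk2
      have hk : k < nv := by simpa [PySem.List.length_pyRange_one] using hk1
      rw [List.getElem_map, List.getElem_reverse, List.getElem_map, List.getElem_map,
        List.getElem_range, PySem.List.getElem_pyRange_one]
      have hlen : ((PySem.List.pyRange 0 (nv:Int) 1).length - 1 - k) = nv - 1 - k := by
        simp [PySem.List.length_pyRange_one]
      rw [hlen]
      have hidx : (0 + ((nv - 1 - k : Nat) : Int)) = ((nv - 1 - k : Nat) : Int) := by ring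
      rw [hidx, Int.toNat_natCast]
      have hc : ((2:Int) ^ (nv - 1 - k)) = ((2 ^ (nv - 1 - k) : Nat) : Int) := by
        push_cast; ring
      rw [hc, PySem.Int.floordiv_natCast, show (2:Int) = ((2:Nat):Int) by norm_num,
        PySem.Int.mod_natCast, pv_nat_and1]
  · simp only [List.map_cons, List.map_nil]
    rw [hval, pv_nat_and1, pvB2i, pv_testBit_div_mod]
    rcases Nat.mod_two_eq_zero_or_one (valB / 2 ^ iN) with h | h <;> simp [h]

theorem pv_notL_sub_actionsL (t : String) (h : pvNotL.contains t = true) :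
    pvActionsL.contains t = true := by
  apply List.contains_iff_mem.mpr
  unfold pvActionsL
  exact List.mem_append.mpr (Or.inl (List.mem_append.mpr (Or.inl
    (List.mem_append.mpr (Or.inl (List.contains_iff_mem.mp h))))))

theorem pv_bad_eq (toks : List String) :
    toks.filter (pvBadP (PySem.List.sorted (PySem.Set.ofList
        (toks.filter (fun a => PySem.Str.strIsalpha a))) (fun x => x) false)) =
      toks.filter (fun t => !(pvActionsL.contains t) && !(t == "(") && !(t == ")")
        && !(PySem.Str.strIsalpha t)) := by
  apply List.filter_congr
  intro t ht
  unfold pvBadP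
  rw [pv_vars_contains toks t ht]
  cases hA : pvActionsL.contains t
  · have hN : pvNotL.contains t = false := by
      cases hN' : pvNotL.contains t
      · rfl
      · rw [pv_notL_sub_actionsL t hN'] at hA; cases hA
    have hA' : t ∉ pvActionsL := fun hm => by
      rw [List.contains_iff_mem.mpr hm] at hA; cases hA
    have hN' : t ∉ pvNotL := fun hm => by
      rw [List.contains_iff_mem.mpr hm] at hN; cases hN
    cases hp : (t == "(") <;> cases hq : (t == ")") <;>
      cases hr : PySem.Str.strIsalpha t <;> simp [hA, hN, hA', hN', hp, hq, hr]
  · have hA' : t ∈ pvActionsL := List.contains_iff_mem.mp hA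
    simp [hA, hA']

set_option maxHeartbeats 2000000 in
theorem pv_main (s : String) : process_statement s = process_statement_alt s := by
  simp only [process_statement, process_statement_alt]
  set toks := PySem.Str.split₀ s with htoks
  set vars := PySem.List.sorted (PySem.Set.ofList
    (toks.filter (fun a => PySem.Str.strIsalpha a))) (fun x => x) false with hvars
  set nv := vars.length with hnv
  set R := 1 <<< nv with hR
  have hR2 : ((2:Int) ^ nv) = ((R : Nat) : Int) := by
    rw [hR, Nat.shiftLeft_eq, one_mul]; push_cast; ring
  have hones : (1 <<< R) - 1 = 2 ^ R - 1 := by rw [Nat.shiftLeft_eq, one_mul]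
  rw [hR2, hones]
  set masksD := altMasks vars R with hmasks
  set rng := (PySem.List.pyRange 0 ((R : Nat) : Int) 1).reverse with hrng
  have hArow : pvRowA vars toks = fun st i =>
      (st.1 ++ [pvRowInts vars toks i],
       st.2 ++ (toks.filter (pvBadP vars)).map (pvBadChars i)) :=
    funext fun st => funext fun i => pv_rowA_eq vars toks st i
  rw [hArow, pv_pair_fold, PySem.List.foldl_append_eq_flatMap,
    PySem.List.foldl_append_singleton_eq_map]
  simp only [List.nil_append, List.map_map]
  have hbad : toks.filter (pvBadP vars) =
      toks.filter (fun t => !(pvActionsL.contains t) && !(t == "(") && !(t == ")")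
        && !(PySem.Str.strIsalpha t)) := pv_bad_eq toks
  rw [hbad]
  have hrows : List.map
      ((fun val => PySem.Chars.join " | ".toList
        (List.map (fun tv => pvCenter (PySem.Int.toChars tv.2) tv.1.toList.length)
          ((vars ++ [s]).zip val))) ∘ pvRowInts vars toks) rng
    = List.map (fun i => PySem.Chars.join " | ".toList
        (List.map (fun tc => pvCenter (PySem.Int.toChars ((tc.2 : Nat) : Int)) tc.1.toList.length)
          ((vars ++ [s]).zip
            (List.map (fun k => i.toNat >>> (nv - 1 - k) &&& 1) (List.range nv) ++
              [(List.foldl (altStep masksD (2 ^ R - 1)) (0, "|", 0, []) toks).2.2.1 >>> i.toNat &&& 1])))) rng := by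
    apply List.map_congr_left
    intro i hi
    have hiB := PySem.List.mem_pyRange_one.mp (List.mem_reverse.mp hi)
    obtain ⟨hi0, hiR⟩ := hiB
    obtain ⟨j, rfl⟩ : ∃ j : Nat, i = ((j : Nat) : Int) :=
      ⟨i.toNat, (Int.toNat_of_nonneg hi0).symm⟩
    have hjR : j < R := by omega
    simp only [Function.comp_apply, Int.toNat_natCast]
    have hinit : pvRel j (0, "|", 0, ([] : List (Int × String × Int)))
        (0, "|", 0, ([] : List (Nat × String × Nat))) := by
      refine ⟨by norm_num, by norm_num, rfl, by decide, ?_, List.Forall₂.nil⟩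
      simp [pvB2i, Nat.zero_testBit]
    have hrel := pv_fold_rel vars masksD R j hjR
      (pv_hmask vars (hvars ▸ pv_vars_nodup _) R j hjR) toks
      (fun t ht => pv_vars_contains toks t ht) (0, "|", 0, []) (0, "|", 0, []) hinit
    have hval := hrel.2.2.2.2.1
    unfold pvRowInts
    rw [pv_cells_eq nv j _ _ hval, List.zip_map_right, List.map_map]
    apply congrArg
    apply List.map_congr_left
    rintro ⟨a, b⟩ _
    rfl
  rw [hrows]
-- ===== VERDICT (by name: the statement is the Claim_ definition above) =====
theorem process_statement_spec : Claim_equal_process_statement := by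
  intro s _ _
  exact pv_main s
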